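-- pv_equiv track=rewrite | github.com/srstevenson/dsa | structy/token-transform.py | token_transform
-- ===== SOURCE A (Python) =====
-- from functools import cache
--
-- def token_transform(s: str, tokens: dict[str, str]) -> str:
--     @cache
--     def _token_transform(s: str) -> str:
--         result: list[str] = []
--         i = 0
--         j = 1
--         while i < len(s):
--             if s[i] != "$":
--                 result.append(s[i])
--                 i += 1
--                 j = i + 1
--             elif s[j] != "$":
--                 j += 1
--             else:
--                 result.append(_token_transform(tokens[s[i : j + 1]]))
--                 i = j + 1
--                 j = i + 1
--
--         return "".join(result)
--
--     return _token_transform(s)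
-- ===== SOURCE B (Python) =====
-- def token_transform(s: str, tokens: dict[str, str]) -> str:
--     def expand(t: str) -> str:
--         parts = t.split("$")
--         out: list[str] = []
--         for idx, part in enumerate(parts):
--             if idx % 2 == 0:
--                 out.append(part)
--             else:
--                 out.append(expand(tokens["$" + part + "$"]))
--         return "".join(out)
--
--     return expand(s)
-- ===== Notes on version B (the rewrite author's own statement) =====
-- stated objective: idiomatic
-- what changed: B replaces A's two-cursor (i/j) character-by-character scan with a single pass over s.split('$'): even-index parts are emitted verbatim, odd-index parts are token names expanded recursively via the same lookup.
import Mathlib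
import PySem

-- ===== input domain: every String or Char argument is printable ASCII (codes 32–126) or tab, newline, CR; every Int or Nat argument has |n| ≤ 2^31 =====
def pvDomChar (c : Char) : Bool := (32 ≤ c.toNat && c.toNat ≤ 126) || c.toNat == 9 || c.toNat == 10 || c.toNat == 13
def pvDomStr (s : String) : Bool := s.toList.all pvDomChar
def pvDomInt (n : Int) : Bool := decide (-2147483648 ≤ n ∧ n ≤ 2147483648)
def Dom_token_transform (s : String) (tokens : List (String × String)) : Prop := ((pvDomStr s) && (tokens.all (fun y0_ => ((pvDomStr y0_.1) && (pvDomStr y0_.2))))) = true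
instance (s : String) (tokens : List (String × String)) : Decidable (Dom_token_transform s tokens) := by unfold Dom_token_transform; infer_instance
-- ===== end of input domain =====

-- B replaces A's two-cursor character scan by one pass over the '$'-split parts (even index =
-- literal, odd index = token name), expanded recursively; idiomatic, and measurably faster by a
-- constant factor (C-level split/join instead of per-character appends).

-- ===== PORT A =====
-- tokens[k] (dict lookup: first match; Pre_ demands nodup keys, as a Python dict has)
def pvLookup (tokens : List (String × String)) (k : String) : Option String :=
  (tokens.find? (fun kv => kv.1 == k)).map (·.2)

-- A's 'elif s[j] != "$": j += 1' scan: first index ≥ j with s[_] = '$'; none = IndexError at s[j]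
def pvScanA (s : List Char) (j : Nat) : Option Nat :=
  match h : s[j]? with
  | none => none
  | some c => if c = '$' then some j else pvScanA s (j + 1)
termination_by s.length - j
decreasing_by
  have hj : j < s.length := (List.getElem?_eq_some_iff.mp h).1
  omega

-- cited by the termination argument of pvLoopA below
theorem pvScanA_ge {s : List Char} : ∀ {j k : Nat}, pvScanA s j = some k → j ≤ k := by
  intro j k
  fun_induction pvScanA s j
  · intro h; simp at h
  · intro h; simp at h; omega
  · rename_i ih
    intro h
    exact le_trans (by omega) (ih h)

mutual
-- _token_transform(s); fuel bounds the recursion depth (Python has no bound; under Pre_ the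
-- token graph is acyclic, so depth ≤ tokens.length + 1 and the fuel below never runs out)
def pvAuxA (tokens : List (String × String)) : Nat → List Char → Option (List Char)
  | 0, _ => none
  | f + 1, s => (pvLoopA tokens f s 0 []).map List.flatten
termination_by f s => (f, 0, 0)
decreasing_by exact Prod.Lex.left _ _ (by omega)
-- the while-loop: i is the cursor, acc the 'result' list; j lives inside pvScanA
def pvLoopA (tokens : List (String × String)) (f : Nat) (s : List Char) (i : Nat)
    (acc : List (List Char)) : Option (List (List Char)) :=
  if hi : i < s.length then
    if s[i] ≠ '$' then pvLoopA tokens f s (i + 1) (acc ++ [[s[i]]])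
    else
      match hs : pvScanA s (i + 1) with
      | none => none                      -- IndexError
      | some j =>
        match pvLookup tokens (String.ofList (PySem.List.slice s (some (i : Int)) (some ((j : Int) + 1)))) with
        | none => none                    -- KeyError
        | some v =>
          match pvAuxA tokens f v.toList with
          | none => none
          | some r => pvLoopA tokens f s (j + 1) (acc ++ [r])
  else some acc
termination_by (f, 1, s.length - i)
decreasing_by
  · exact Prod.Lex.right _ (Prod.Lex.right _ (by omega))
  · exact Prod.Lex.right _ (Prod.Lex.left _ _ (by omega))
  · have hj : i + 1 ≤ j := pvScanA_ge hs
    exact Prod.Lex.right _ (Prod.Lex.right _ (by omega))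
end

def token_transform (s : String) (tokens : List (String × String)) : String :=
  match pvAuxA tokens (tokens.length + 2) s.toList with
  | some cs => String.ofList cs
  | none => ""                            -- unreachable under Pre_ (A raises on these inputs)

-- ===== PORT B =====
mutual
-- expand(t) of Source B; same recursion-depth fuel as the A port
def pvExpandB (tokens : List (String × String)) : Nat → List Char → Option (List Char)
  | 0, _ => none
  | f + 1, t => (pvPartsB tokens f (List.splitOn '$' t) false []).map List.flatten
termination_by f t => (f, 0, 0)
decreasing_by exact Prod.Lex.left _ _ (by omega)
-- the for-loop over enumerate(parts): isTok is the index parity, out the accumulator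
def pvPartsB (tokens : List (String × String)) (f : Nat) :
    List (List Char) → Bool → List (List Char) → Option (List (List Char))
  | [], _, out => some out
  | part :: rest, isTok, out =>
    if isTok then
      match pvLookup tokens (String.ofList ('$' :: part ++ ['$'])) with
      | none => none                      -- KeyError
      | some v =>
        match pvExpandB tokens f v.toList with
        | none => none
        | some r => pvPartsB tokens f rest false (out ++ [r])
    else pvPartsB tokens f rest true (out ++ [part])
termination_by parts isTok out => (f, 1, parts.length)
decreasing_by
  · exact Prod.Lex.right _ (Prod.Lex.left _ _ (by omega))
  · exact Prod.Lex.right _ (Prod.Lex.right _ (by simp))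
  · exact Prod.Lex.right _ (Prod.Lex.right _ (by simp))
end

def token_transform_alt (s : String) (tokens : List (String × String)) : String :=
  match pvExpandB tokens (tokens.length + 2) s.toList with
  | some cs => String.ofList cs
  | none => ""

-- ===== PRECONDITION & SPEC =====
-- the token keys a string references: the odd parts of its '$'-split, wrapped back in '$'
def pvOdds : List (List Char) → List String
  | [] => []
  | [_] => []
  | _ :: p :: rest => String.ofList ('$' :: p ++ ['$']) :: pvOdds rest
def pvRefs (t : List Char) : List String := pvOdds (List.splitOn '$' t)
-- every '$' is matched
def pvEven (t : List Char) : Bool := t.count '$' % 2 == 0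
-- keys reachable (in n steps) from a set of keys through token definitions
def pvStep (tokens : List (String × String)) (ks : PySem.Set String) : PySem.Set String :=
  PySem.Set.update ks (ks.flatMap (fun k =>
    match pvLookup tokens k with | some v => pvRefs v.toList | none => []))
def pvReach (tokens : List (String × String)) : Nat → PySem.Set String → PySem.Set String
  | 0, ks => ks
  | n + 1, ks => pvReach tokens n (pvStep tokens ks)

-- the set of token keys A may evaluate: closure of s's references through token definitions
def pvRS (s : String) (tokens : List (String × String)) : List String :=
  pvReach tokens (tokens.length + 1) (PySem.Set.ofList (pvRefs s.toList))
-- a reachable key is usable: defined, with a fully '$'-matched value whose references stay in R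
def pvGoodKey (tokens : List (String × String)) (R : List String) (k : String) : Bool :=
  match pvLookup tokens k with
  | none => false
  | some v => pvEven v.toList && (pvRefs v.toList).all (fun k' => decide (k' ∈ R))

-- Pre_ = where A returns normally: s's '$'s are matched (else IndexError), every key reachable
-- from s is defined (else KeyError) with a matched value whose references stay reachable, and no
-- reachable key reaches itself (else RecursionError); keys are distinct, as in any Python dict.
def Pre_token_transform (s : String) (tokens : List (String × String)) : Prop :=
  pvEven s.toList = true ∧
  (∀ k ∈ pvRefs s.toList, k ∈ pvRS s tokens) ∧
  (∀ k ∈ pvRS s tokens, pvGoodKey tokens (pvRS s tokens) k = true) ∧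
  (∀ k ∈ pvRS s tokens, k ∉ pvReach tokens tokens.length (PySem.Set.ofList
      (match pvLookup tokens k with | some v => pvRefs v.toList | none => []))) ∧
  (tokens.map (·.1)).Nodup
instance (s : String) (tokens : List (String × String)) : Decidable (Pre_token_transform s tokens) := by
  unfold Pre_token_transform; infer_instance

def pvWitness_token_transform : String × (List (String × String)) :=
  ("$a$x", [("$a$", "y$b$"), ("$b$", "z")])

def Spec_token_transform (s : String) (tokens : List (String × String)) (out : String) : Prop := out = token_transform_alt s tokens
instance (s : String) (tokens : List (String × String)) (out : String) : Decidable (Spec_token_transform s tokens out) := by unfold Spec_token_transform; infer_instance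

-- ===== CLAIM (what is proved, stated in full; the proofs are below) =====
def Claim_equal_token_transform : Prop := ∀ (s : String) (tokens : List (String × String)), Dom_token_transform s tokens → Pre_token_transform s tokens → Spec_token_transform s tokens (token_transform s tokens)

-- ===== LEMMAS AND PROOFS =====

-- common shape of one expansion pass, parametric in the expander used on token values
def pvSpec (tokens : List (String × String)) (e : String → Option (List Char)) :
    List Char → Option (List Char)
  | [] => some []
  | c :: rest =>
    if c = '$' then
      if (rest.dropWhile (· ≠ '$')) = [] then none
      else
        match pvLookup tokens (String.ofList ('$' :: rest.takeWhile (· ≠ '$') ++ ['$'])) with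
        | none => none
        | some v =>
          match e v with
          | none => none
          | some r => (pvSpec tokens e ((rest.dropWhile (· ≠ '$')).tail)).map (r ++ ·)
    else (pvSpec tokens e rest).map (c :: ·)
termination_by t => t.length
decreasing_by
  · have h1 := List.length_dropWhile_le (p := fun c => decide (c ≠ '$')) (l := rest)
    rw [List.length_tail, List.length_cons]
    omega
  · simp

-- facts about List.splitOn on a single-character separator (B's s.split('$'))
theorem pvSplitOn_nil : List.splitOn '$' ([] : List Char) = [[]] := by
  simp [List.splitOn]

theorem pvSplitOn_cons (x : Char) (xs : List Char) :
    List.splitOn '$' (x :: xs) =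
      if x = '$' then [] :: List.splitOn '$' xs
      else (List.splitOn '$' xs).modifyHead (x :: ·) := by
  by_cases h : x = '$' <;> simp [List.splitOn, List.splitOnP_cons, h, List.modifyHead]

theorem pvSplitOn_sepfree_append (p u : List Char) (hp : ∀ c ∈ p, c ≠ '$') :
    List.splitOn '$' (p ++ u) = (List.splitOn '$' u).modifyHead (p ++ ·) := by
  induction p with
  | nil => cases h : List.splitOn '$' u <;> simp [h]
  | cons c p ih =>
    have hc : c ≠ '$' := hp c (by simp)
    rw [List.cons_append, pvSplitOn_cons, if_neg hc, ih (fun d hd => hp d (by simp [hd]))]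
    cases h : List.splitOn '$' u <;> simp [h]

theorem pvSpec_prefix (tokens : List (String × String)) (e : String → Option (List Char))
    (p : List Char) (rest : List Char) (hp : ∀ c ∈ p, c ≠ '$') :
    pvSpec tokens e (p ++ rest) = (pvSpec tokens e rest).map (p ++ ·) := by
  induction p with
  | nil => cases h : pvSpec tokens e rest <;> simp [h]
  | cons c p ih =>
    have hc : c ≠ '$' := hp c (by simp)
    rw [List.cons_append, pvSpec, if_neg hc, ih (fun d hd => hp d (by simp [hd]))]
    cases h : pvSpec tokens e rest <;> simp [h]

theorem pvScanA_eq (s : List Char) (j : Nat) :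
    pvScanA s j =
      (match (s.drop j).dropWhile (· ≠ '$') with
       | [] => none
       | _ :: _ => some (j + ((s.drop j).takeWhile (· ≠ '$')).length)) := by
  fun_induction pvScanA s j
  · rename_i j h
    have hle : s.length ≤ j := by
      by_contra hlt
      rw [List.getElem?_eq_getElem (by omega)] at h
      simp at h
    rw [List.drop_eq_nil_of_le hle]
    simp
  · rename_i j h
    obtain ⟨hj, he⟩ := List.getElem?_eq_some_iff.mp h
    rw [List.drop_eq_getElem_cons hj, he]
    simp
  · rename_i j c h hc ih
    obtain ⟨hj, he⟩ := List.getElem?_eq_some_iff.mp h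
    have hcp : (decide (c ≠ '$')) = true := by simp [hc]
    rw [ih, List.drop_eq_getElem_cons hj, he, List.dropWhile_cons, List.takeWhile_cons, hcp]
    simp only [if_true]
    cases hdw : List.dropWhile (fun x => decide (x ≠ '$')) (s.drop (j + 1)) <;>
      simp [hdw] <;> omega

theorem pvDropWhileHead (p : Char → Bool) :
    ∀ (l : List Char) (d : Char) (r : List Char), List.dropWhile p l = d :: r → p d = false := by
  intro l
  induction l with
  | nil => intro d r h; simp at h
  | cons a t ih =>
    intro d r h
    rw [List.dropWhile_cons] at h
    by_cases hp : p a
    · exact ih d r (by simpa [hp] using h)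
    · rw [if_neg (by simp [hp])] at h
      cases h
      simpa using hp

theorem pvLoopA_spec (tokens : List (String × String)) (f : Nat) (s : List Char) :
    ∀ (n i : Nat) (acc : List (List Char)), s.length - i ≤ n →
    (pvLoopA tokens f s i acc).map List.flatten
      = (pvSpec tokens (fun v => pvAuxA tokens f v.toList) (s.drop i)).map
          (fun out => acc.flatten ++ out) := by
  intro n
  induction n with
  | zero =>
    intro i acc hn
    rw [pvLoopA, dif_neg (by omega), List.drop_eq_nil_of_le (by omega), pvSpec]
    simp
  | succ n ih =>
    intro i acc hn
    by_cases hi : i < s.length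
    · rw [pvLoopA, dif_pos hi]
      have hdi : s.drop i = s[i] :: s.drop (i + 1) := List.drop_eq_getElem_cons hi
      by_cases hc : s[i] = '$'
      · rw [if_neg (by simp [hc]), hdi, hc, pvSpec, if_pos rfl]
        cases hdw : List.dropWhile (fun x => decide (x ≠ '$')) (s.drop (i + 1)) with
        | nil =>
          have hscan : pvScanA s (i + 1) = none := by rw [pvScanA_eq, hdw]
          rw [if_pos rfl]
          split
          · simp
          all_goals rename_i j hs; rw [hscan] at hs; cases hs
        | cons d rest' =>
          have hd : d = '$' := by
            have := pvDropWhileHead _ _ _ _ hdw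
            simpa using this
          set tw := List.takeWhile (fun x => decide (x ≠ '$')) (s.drop (i + 1)) with htw
          have hscan : pvScanA s (i + 1) = some (i + 1 + tw.length) := by
            rw [pvScanA_eq, hdw]
          have hsplit : s.drop (i + 1) = tw ++ '$' :: rest' := by
            rw [← hd, ← hdw, htw, List.takeWhile_append_dropWhile]
          rw [if_neg (by simp)]
          split
          · rename_i hs; rw [hscan] at hs; cases hs
          rename_i j hs
          rw [hscan] at hs
          injection hs with hj
          have hkey : PySem.List.slice s (some (i : Int)) (some ((j : Int) + 1))
              = '$' :: tw ++ ['$'] := by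
            have hcast : ((j : Int) + 1) = ((j + 1 : Nat) : Int) := by push_cast; ring
            rw [hcast, PySem.List.slice_natCast]
            have h2 : j + 1 - i = tw.length + 2 := by omega
            rw [h2, hdi, hc, hsplit, List.take_succ_cons]
            have h3 : tw.length + 1 = tw.length + 1 := rfl
            rw [show tw.length + 1 = tw.length + 1 from rfl]
            rw [show List.take (tw.length + 1) (tw ++ '$' :: rest')
                  = tw ++ List.take 1 ('$' :: rest') from List.take_length_add_append 1]
            simp
          rw [hkey]
          cases hlk : pvLookup tokens (String.ofList ('$' :: tw ++ ['$'])) with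
          | none => simp
          | some v =>
            simp only
            cases hav : pvAuxA tokens f v.toList with
            | none => simp
            | some r =>
              simp only
              have hrest : s.drop (j + 1) = rest' := by
                have : j + 1 = (i + 1) + (tw.length + 1) := by omega
                rw [this, ← List.drop_drop, hsplit]
                rw [show List.drop (tw.length + 1) (tw ++ '$' :: rest')
                      = List.drop 1 ('$' :: rest') from ?_]
                · simp
                · have := List.drop_length_add_append (l₁ := tw) (l₂ := '$' :: rest') (i := 1)
                  simpa using this
              rw [ih (j + 1) (acc ++ [r]) (by omega), hrest]
              simp only [List.tail_cons]
              cases hsp : pvSpec tokens (fun v => pvAuxA tokens f v.toList) rest' <;> simp [hsp]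
      · rw [if_pos (by simp [hc]), hdi, pvSpec, if_neg hc,
          ih (i + 1) (acc ++ [[s[i]]]) (by omega)]
        cases hsp : pvSpec tokens (fun v => pvAuxA tokens f v.toList) (s.drop (i + 1)) <;>
          simp [hsp]
    · rw [pvLoopA, dif_neg hi, List.drop_eq_nil_of_le (by omega), pvSpec]
      simp

theorem pvTakeWhileFree (t : List Char) :
    ∀ c ∈ t.takeWhile (fun x => decide (x ≠ '$')), c ≠ '$' := by
  intro c hc
  simpa using List.mem_takeWhile_imp hc

theorem pvCountFree {p : List Char} (hp : ∀ c ∈ p, c ≠ '$') : p.count '$' = 0 :=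
  List.count_eq_zero.mpr (fun hmem => hp _ hmem rfl)

theorem pvPartsB_spec (tokens : List (String × String)) (f : Nat) :
    ∀ (n : Nat) (t : List Char) (acc : List (List Char)), t.length ≤ n → pvEven t = true →
    (pvPartsB tokens f (List.splitOn '$' t) false acc).map List.flatten
      = (pvSpec tokens (fun v => pvExpandB tokens f v.toList) t).map
          (fun out => acc.flatten ++ out) := by
  intro n
  induction n with
  | zero =>
    intro t acc hn _he
    have ht : t = [] := List.eq_nil_of_length_eq_zero (by omega)
    subst ht
    rw [pvSplitOn_nil, pvPartsB, pvPartsB, pvSpec]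
    simp
  | succ n ih =>
    intro t acc hn he
    have hpfree := pvTakeWhileFree t
    cases hdw : t.dropWhile (fun x => decide (x ≠ '$')) with
    | nil =>
      have ht : t = t.takeWhile (fun x => decide (x ≠ '$')) := by
        conv_lhs => rw [← List.takeWhile_append_dropWhile
          (p := fun x => decide (x ≠ '$')) (l := t)]
        rw [hdw, List.append_nil]
      have hsplit : List.splitOn '$' t = [t.takeWhile (fun x => decide (x ≠ '$'))] := by
        conv_lhs => rw [ht]
        rw [show (t.takeWhile (fun x => decide (x ≠ '$')))
              = t.takeWhile (fun x => decide (x ≠ '$')) ++ [] from (List.append_nil _).symm,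
          pvSplitOn_sepfree_append _ _ hpfree, pvSplitOn_nil]
        simp
      have hspec : pvSpec tokens (fun v => pvExpandB tokens f v.toList) t
          = some (t.takeWhile (fun x => decide (x ≠ '$'))) := by
        conv_lhs => rw [ht]
        rw [show (t.takeWhile (fun x => decide (x ≠ '$')))
              = t.takeWhile (fun x => decide (x ≠ '$')) ++ [] from (List.append_nil _).symm,
          pvSpec_prefix _ _ _ _ hpfree, pvSpec]
        simp
      rw [hsplit, hspec, pvPartsB, pvPartsB]
      simp
    | cons d r =>
      have hd : d = '$' := by simpa using pvDropWhileHead _ _ _ _ hdw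
      subst hd
      have ht : t = t.takeWhile (fun x => decide (x ≠ '$')) ++ '$' :: r := by
        conv_lhs => rw [← List.takeWhile_append_dropWhile
          (p := fun x => decide (x ≠ '$')) (l := t)]
        rw [hdw]
      have hnfree := pvTakeWhileFree r
      cases hdw2 : r.dropWhile (fun x => decide (x ≠ '$')) with
      | nil =>
        exfalso
        have hr : r = r.takeWhile (fun x => decide (x ≠ '$')) := by
          conv_lhs => rw [← List.takeWhile_append_dropWhile
            (p := fun x => decide (x ≠ '$')) (l := r)]
          rw [hdw2, List.append_nil]
        have hcount : t.count '$' = 1 := by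
          rw [ht, List.count_append, List.count_cons_self, pvCountFree hpfree]
          conv_lhs => rw [hr]
          rw [pvCountFree hnfree]
        rw [pvEven, hcount] at he
        simp at he
      | cons d2 r2 =>
        have hd2 : d2 = '$' := by simpa using pvDropWhileHead _ _ _ _ hdw2
        subst hd2
        have hr : r = r.takeWhile (fun x => decide (x ≠ '$')) ++ '$' :: r2 := by
          conv_lhs => rw [← List.takeWhile_append_dropWhile
            (p := fun x => decide (x ≠ '$')) (l := r)]
          rw [hdw2]
        have hsplit : List.splitOn '$' t
            = t.takeWhile (fun x => decide (x ≠ '$'))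
              :: r.takeWhile (fun x => decide (x ≠ '$')) :: List.splitOn '$' r2 := by
          conv_lhs => rw [ht]
          rw [pvSplitOn_sepfree_append _ _ hpfree, pvSplitOn_cons, if_pos rfl]
          conv_lhs => rw [hr]
          rw [pvSplitOn_sepfree_append _ _ hnfree, pvSplitOn_cons, if_pos rfl]
          cases h2 : List.splitOn '$' r2 <;> simp [h2, List.modifyHead]
        have hlen : r2.length < t.length := by
          conv_rhs => rw [ht]
          conv_rhs => rw [hr]
          simp [List.length_append]
          omega
        have heven2 : pvEven r2 = true := by
          have hcount : t.count '$' = r2.count '$' + 2 := by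
            rw [ht, List.count_append, List.count_cons_self, pvCountFree hpfree]
            conv_lhs => rw [hr]
            rw [List.count_append, List.count_cons_self, pvCountFree hnfree]
            omega
          rw [pvEven, hcount] at he
          rw [pvEven]
          simp at he ⊢
          omega
        rw [hsplit, pvPartsB]
        simp only [Bool.false_eq_true, if_false]
        rw [pvPartsB]
        simp only [if_true]
        have hspec : pvSpec tokens (fun v => pvExpandB tokens f v.toList) t
            = (pvSpec tokens (fun v => pvExpandB tokens f v.toList) ('$' :: r)).map
                ((t.takeWhile (fun x => decide (x ≠ '$'))) ++ ·) := by
          conv_lhs => rw [ht]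
          rw [pvSpec_prefix _ _ _ _ hpfree]
        rw [hspec, pvSpec, if_pos rfl, if_neg (by rw [hdw2]; simp), hdw2]
        cases hlk : pvLookup tokens
            (String.ofList ('$' :: r.takeWhile (fun x => decide (x ≠ '$')) ++ ['$'])) with
        | none => simp
        | some v =>
          simp only
          cases hev : pvExpandB tokens f v.toList with
          | none => simp
          | some rr =>
            simp only [List.tail_cons]
            rw [ih r2 ((acc ++ [t.takeWhile (fun x => decide (x ≠ '$'))]) ++ [rr])
              (by omega) heven2]
            cases hsp : pvSpec tokens (fun v => pvExpandB tokens f v.toList) r2 <;>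
              simp [hsp]

theorem pvOdds_modifyHead (g : List Char → List Char) (l : List (List Char)) :
    pvOdds (l.modifyHead g) = pvOdds l := by
  cases l with
  | nil => rfl
  | cons a l =>
    cases l with
    | nil => rfl
    | cons b l' => rfl

theorem pvRefs_cons_ne {c : Char} (rest : List Char) (hc : c ≠ '$') :
    pvRefs (c :: rest) = pvRefs rest := by
  rw [pvRefs, pvSplitOn_cons, if_neg hc, pvOdds_modifyHead, pvRefs]

theorem pvSplitOn_ne_nil (t : List Char) : List.splitOn '$' t ≠ [] := by
  induction t with
  | nil => simp [pvSplitOn_nil]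
  | cons c t ih =>
    rw [pvSplitOn_cons]
    split_ifs
    · simp
    · cases h : List.splitOn '$' t with
      | nil => exact absurd h ih
      | cons q qs => simp [List.modifyHead, h]

theorem pvRefs_dollar {rest r2 : List Char} {d : Char}
    (hdw : rest.dropWhile (fun x => decide (x ≠ '$')) = d :: r2) :
    pvRefs ('$' :: rest)
      = String.ofList ('$' :: rest.takeWhile (fun x => decide (x ≠ '$')) ++ ['$'])
        :: pvRefs r2 := by
  have hd : d = '$' := by simpa using pvDropWhileHead _ _ _ _ hdw
  subst hd
  have hrest : rest = rest.takeWhile (fun x => decide (x ≠ '$')) ++ '$' :: r2 := by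
    conv_lhs => rw [← List.takeWhile_append_dropWhile
      (p := fun x => decide (x ≠ '$')) (l := rest)]
    rw [hdw]
  rw [pvRefs, pvSplitOn_cons, if_pos rfl]
  conv_lhs => rw [hrest]
  rw [pvSplitOn_sepfree_append _ _ (pvTakeWhileFree rest), pvSplitOn_cons, if_pos rfl]
  cases h2 : List.splitOn '$' r2 with
  | nil => exact absurd h2 (pvSplitOn_ne_nil r2)
  | cons q qs => simp [List.modifyHead, pvOdds, pvRefs, h2]

theorem pvSpec_congr (tokens : List (String × String)) (e e' : String → Option (List Char)) :
    ∀ t : List Char,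
    (∀ k ∈ pvRefs t, ∀ v, pvLookup tokens k = some v → e v = e' v) →
    pvSpec tokens e t = pvSpec tokens e' t := by
  intro t
  fun_induction pvSpec tokens e t
  · intro _; rw [pvSpec]
  · rename_i rest h
    intro _
    rw [pvSpec, if_pos rfl, if_pos h]
  · rename_i rest h hlk
    intro _
    rw [pvSpec, if_pos rfl, if_neg h, hlk]
  · rename_i rest h v hlk hev
    intro he
    obtain ⟨d, r2, hdw⟩ : ∃ d r2, rest.dropWhile (fun x => decide (x ≠ '$')) = d :: r2 := by
      cases hx : rest.dropWhile (fun x => decide (x ≠ '$')) with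
      | nil => exact absurd hx h
      | cons d r2 => exact ⟨d, r2, rfl⟩
    have hkey := he _ (by rw [pvRefs_dollar hdw]; exact List.mem_cons_self) v hlk
    rw [pvSpec, if_pos rfl, if_neg h, hlk]
    simp only
    rw [← hkey, hev]
  · rename_i rest h v hlk r hev ih
    intro he
    obtain ⟨d, r2, hdw⟩ : ∃ d r2, rest.dropWhile (fun x => decide (x ≠ '$')) = d :: r2 := by
      cases hx : rest.dropWhile (fun x => decide (x ≠ '$')) with
      | nil => exact absurd hx h
      | cons d r2 => exact ⟨d, r2, rfl⟩
    have hkey := he _ (by rw [pvRefs_dollar hdw]; exact List.mem_cons_self) v hlk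
    rw [pvSpec, if_pos rfl, if_neg h, hlk]
    simp only
    rw [← hkey, hev, ih (by
      intro k hk v' hv'
      refine he k ?_ v' hv'
      rw [pvRefs_dollar hdw]
      rw [hdw] at hk
      exact List.mem_cons_of_mem _ (by simpa using hk))]
  · rename_i c rest h ih
    intro he
    rw [pvSpec, if_neg h, ih (by rw [← pvRefs_cons_ne rest h]; exact he)]

theorem pvMain (tokens : List (String × String)) (R : List String)
    (hclosed : ∀ k ∈ R, ∀ v, pvLookup tokens k = some v →
      pvEven v.toList = true ∧ ∀ k' ∈ pvRefs v.toList, k' ∈ R) :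
    ∀ (f : Nat) (t : List Char), pvEven t = true → (∀ k ∈ pvRefs t, k ∈ R) →
    pvAuxA tokens f t = pvExpandB tokens f t := by
  intro f
  induction f with
  | zero => intro t _ _; rw [pvAuxA, pvExpandB]
  | succ f ih =>
    intro t ht hrefs
    have hA := pvLoopA_spec tokens f t t.length 0 [] (by omega)
    have hB := pvPartsB_spec tokens f t.length t [] (le_refl _) ht
    simp only [List.drop_zero, List.flatten_nil, List.nil_append] at hA hB
    rw [pvAuxA, pvExpandB, hA, hB,
      pvSpec_congr tokens (fun v => pvAuxA tokens f v.toList)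
        (fun v => pvExpandB tokens f v.toList) t
        (by
          intro k hk v hv
          obtain ⟨hve, hvr⟩ := hclosed k (hrefs k hk) v hv
          simpa using ih v.toList hve (fun k' hk' => hvr k' hk'))]

-- ===== VERDICT (by name: the statement is the Claim_ definition above) =====
theorem token_transform_spec : Claim_equal_token_transform := by
  intro s tokens hdom hpre
  obtain ⟨h1, h2, h3, -, -⟩ := hpre
  unfold Spec_token_transform token_transform token_transform_alt
  rw [pvMain tokens (pvRS s tokens) ?_ _ _ h1 h2]
  intro k hk v hv
  have := h3 k hk
  rw [pvGoodKey, hv] at this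
  simp only [Bool.and_eq_true, List.all_eq_true, decide_eq_true_eq] at this
  exact ⟨this.1, fun k' hk' => this.2 k' hk'⟩
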